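-- pv_equiv track=rewrite | github.com/Mircea-Marian/Cell-Recognition | 3p.py | buildFeatureArray
-- ===== SOURCE A (Python) =====
-- from math import sqrt
--
-- def buildFeatureArray(red_v, green_v, blue_v, radius, radius1, radius2):
--     inputs = []
--
--     n = len(red_v)
--     m = len(red_v[0])
--     val = round(sqrt(radius * radius / 2))
--     val1 = round(sqrt(radius1 * radius1 / 2))
--
--     for i in range(n):
--         for j in range(m):
--             features = [\
--                 \
--                 red_v[i][j],\
--                 green_v[i][j],\
--                 blue_v[i][j],\
--                 \
--                 red_v[i][j-radius] if j-radius >= 0 else 0,\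
--                 green_v[i][j-radius] if j-radius >= 0 else 0,\
--                 blue_v[i][j-radius] if j-radius >= 0 else 0,\
--                 \
--                 red_v[i][j+radius] if j+radius < m else 0,\
--                 green_v[i][j+radius] if j+radius < m else 0,\
--                 blue_v[i][j+radius] if j+radius < m else 0,\
--                 \
--                 red_v[i-radius][j] if i-radius >= 0 else 0,\
--                 green_v[i-radius][j] if i-radius >= 0 else 0,\
--                 blue_v[i-radius][j] if i-radius >= 0 else 0,\
--                 \
--                 red_v[i+radius][j] if i+radius < n else 0,\
--                 green_v[i+radius][j] if i+radius < n else 0,\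
--                 blue_v[i+radius][j] if i+radius < n else 0,\
--                 \
--                 red_v[i+val][j+val] if i+val < n and j+val < m else 0,\
--                 green_v[i+val][j+val] if i+val < n and j+val < m else 0,\
--                 blue_v[i+val][j+val] if i+val < n and j+val < m else 0,\
--                 \
--                 red_v[i-val][j+val] if i-val >= 0 and j+val < m else 0,\
--                 green_v[i-val][j+val] if i-val >= 0 and j+val < m else 0,\
--                 blue_v[i-val][j+val] if i-val >= 0 and j+val < m else 0,\
--                 \
--                 red_v[i+val][j-val] if i+val < n and j-val >= 0 else 0,\
--                 green_v[i+val][j-val] if i+val < n and j-val >= 0 else 0,\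
--                 blue_v[i+val][j-val] if i+val < n and j-val >= 0 else 0,\
--                 \
--                 red_v[i-val][j-val] if i-val >= 0 and j-val >= 0 else 0,\
--                 green_v[i-val][j-val] if i-val >= 0 and j-val >= 0 else 0,\
--                 blue_v[i-val][j-val] if i-val >= 0 and j-val >= 0 else 0,\
--                 \
--                 red_v[i][j-radius1] if j-radius1 >= 0 else 0,\
--                 green_v[i][j-radius1] if j-radius1 >= 0 else 0,\
--                 blue_v[i][j-radius1] if j-radius1 >= 0 else 0,\
--                 \
--                 red_v[i][j+radius1] if j+radius1 < m else 0,\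
--                 green_v[i][j+radius1] if j+radius1 < m else 0,\
--                 blue_v[i][j+radius1] if j+radius1 < m else 0,\
--                 \
--                 red_v[i-radius1][j] if i-radius1 >= 0 else 0,\
--                 green_v[i-radius1][j] if i-radius1 >= 0 else 0,\
--                 blue_v[i-radius1][j] if i-radius1 >= 0 else 0,\
--                 \
--                 red_v[i+radius1][j] if i+radius1 < n else 0,\
--                 green_v[i+radius1][j] if i+radius1 < n else 0,\
--                 blue_v[i+radius1][j] if i+radius1 < n else 0,\
--                 \
--                 red_v[i+val1][j+val1] if i+val1 < n and j+val1 < m else 0,\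
--                 green_v[i+val1][j+val1] if i+val1 < n and j+val1 < m else 0,\
--                 blue_v[i+val1][j+val1] if i+val1 < n and j+val1 < m else 0,\
--                 \
--                 red_v[i-val1][j+val1] if i-val1 >= 0 and j+val1 < m else 0,\
--                 green_v[i-val1][j+val1] if i-val1 >= 0 and j+val1 < m else 0,\
--                 blue_v[i-val1][j+val1] if i-val1 >= 0 and j+val1 < m else 0,\
--                 \
--                 red_v[i+val1][j-val1] if i+val1 < n and j-val1 >= 0 else 0,\
--                 green_v[i+val1][j-val1] if i+val1 < n and j-val1 >= 0 else 0,\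
--                 blue_v[i+val1][j-val1] if i+val1 < n and j-val1 >= 0 else 0,\
--                 \
--                 red_v[i-val1][j-val1] if i-val1 >= 0 and j-val1 >= 0 else 0,\
--                 green_v[i-val1][j-val1] if i-val1 >= 0 and j-val1 >= 0 else 0,\
--                 blue_v[i-val1][j-val1] if i-val1 >= 0 and j-val1 >= 0 else 0,\
--                 \
--                 red_v[i][j-radius2] if j-radius2 >= 0 else 0,\
--                 green_v[i][j-radius2] if j-radius2 >= 0 else 0,\
--                 blue_v[i][j-radius2] if j-radius2 >= 0 else 0,\
--                 \
--                 red_v[i][j+radius2] if j+radius2 < m else 0,\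
--                 green_v[i][j+radius2] if j+radius2 < m else 0,\
--                 blue_v[i][j+radius2] if j+radius2 < m else 0,\
--                 \
--                 red_v[i-radius2][j] if i-radius2 >= 0 else 0,\
--                 green_v[i-radius2][j] if i-radius2 >= 0 else 0,\
--                 blue_v[i-radius2][j] if i-radius2 >= 0 else 0,\
--                 \
--                 red_v[i+radius2][j] if i+radius2 < n else 0,\
--                 green_v[i+radius2][j] if i+radius2 < n else 0,\
--                 blue_v[i+radius2][j] if i+radius2 < n else 0\
--                 ]
--             inputs.append(features)
--     return inputs
-- ===== SOURCE B (Python) =====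
-- from math import sqrt
--
--
-- def buildFeatureArray(red_v, green_v, blue_v, radius, radius1, radius2):
--     n = len(red_v)
--     m = len(red_v[0])
--     val = round(sqrt(radius * radius / 2))
--     val1 = round(sqrt(radius1 * radius1 / 2))
--
--     def plane(ch, di, dj):
--         # whole-image shift by (di, dj): slice out the in-range rows/columns
--         # and zero-pad, no per-pixel bounds tests
--         zero = [0] * m
--         if di >= 0:
--             rs = ch[di:n]
--             rs = rs + [zero] * (n - len(rs))
--         else:
--             rs = ch[:max(0, n + di)]
--             rs = [zero] * (n - len(rs)) + rs
--         flat = []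
--         for row in rs:
--             if dj >= 0:
--                 t = row[dj:m]
--                 flat += t + [0] * (m - len(t))
--             else:
--                 t = row[:max(0, m + dj)]
--                 flat += [0] * (m - len(t)) + t
--         return flat
--
--     offsets = [(0, 0),
--                (0, -radius), (0, radius), (-radius, 0), (radius, 0),
--                (val, val), (-val, val), (val, -val), (-val, -val),
--                (0, -radius1), (0, radius1), (-radius1, 0), (radius1, 0),
--                (val1, val1), (-val1, val1), (val1, -val1), (-val1, -val1),
--                (0, -radius2), (0, radius2), (-radius2, 0), (radius2, 0)]
--
--     planes = [plane(ch, di, dj)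
--               for (di, dj) in offsets
--               for ch in (red_v, green_v, blue_v)]
--
--     return [[p[k] for p in planes] for k in range(n * m)]
-- ===== Notes on version B (the rewrite author's own statement) =====
-- stated objective: alternative
-- what changed: Instead of assembling each pixel's 63 features with per-pixel guarded indexing, B precomputes each of the 63 feature planes as a whole-image shift of a channel built by slicing and zero-padding (no per-pixel bounds tests), then transposes the planes into per-pixel feature rows.
import Mathlib
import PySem

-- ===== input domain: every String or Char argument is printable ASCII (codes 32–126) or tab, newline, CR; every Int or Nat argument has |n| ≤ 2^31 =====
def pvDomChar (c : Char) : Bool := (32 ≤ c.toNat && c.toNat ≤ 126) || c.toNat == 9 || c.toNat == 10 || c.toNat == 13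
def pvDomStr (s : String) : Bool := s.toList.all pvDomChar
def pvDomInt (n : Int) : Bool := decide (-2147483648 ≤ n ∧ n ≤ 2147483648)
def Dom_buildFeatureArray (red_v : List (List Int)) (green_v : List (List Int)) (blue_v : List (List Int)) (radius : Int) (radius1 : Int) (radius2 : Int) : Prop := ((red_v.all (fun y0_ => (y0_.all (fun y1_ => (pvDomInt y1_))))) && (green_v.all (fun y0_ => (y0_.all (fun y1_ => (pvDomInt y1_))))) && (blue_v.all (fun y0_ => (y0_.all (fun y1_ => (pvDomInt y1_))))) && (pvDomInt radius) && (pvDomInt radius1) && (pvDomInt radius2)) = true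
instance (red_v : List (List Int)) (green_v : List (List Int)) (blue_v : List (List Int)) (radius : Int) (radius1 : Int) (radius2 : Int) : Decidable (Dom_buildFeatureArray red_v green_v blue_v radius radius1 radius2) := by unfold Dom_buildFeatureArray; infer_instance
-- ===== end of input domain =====

-- B replaces A's per-pixel 63-entry guarded-index literal by a different algorithm: it
-- precomputes each feature plane as a whole-image shift built by slicing and zero-padding
-- (no per-pixel bounds tests), then transposes the planes into per-pixel rows (objective:
-- alternative); same return values.

-- ===== PORT A =====
-- round(sqrt(r*r/2)) ported by hand as exact integer arithmetic modelling each IEEE-754 step of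
-- the CPython computation: float(r*r) (round to 53 bits, nearest-even), exact halving, correctly
-- rounded binary64 square root, then Python's round (half-to-even); exact for |r| ≤ 2^31
-- (validated against CPython on the boundary radii where the naive integer sqrt formula differs).
-- pvSqrt is the floor integer square root by Newton iteration and pvBitLen the bit length
-- (fuel-based so the kernel can evaluate them; fuel 256 is ample for arguments below 2^110).
def pvSqrtAux : Nat → Nat → Nat → Nat
  | 0, _, x => x
  | fuel+1, n, x =>
    let y := (x + n / x) / 2
    if y < x then pvSqrtAux fuel n y else x
def pvSqrt (n : Nat) : Nat := if n ≤ 1 then n else pvSqrtAux 256 n n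
def pvBitsAux : Nat → Nat → Nat
  | 0, _ => 0
  | fuel+1, n => if n = 0 then 0 else pvBitsAux fuel (n / 2) + 1
def pvBitLen (n : Nat) : Nat := pvBitsAux 256 n
-- round a nonnegative dyadic rational m / 2^e to the nearest integer, ties to even
def pvRoundHalfEven (m : Nat) (e : Nat) : Nat :=
  let q := m / 2 ^ e
  let r := m % 2 ^ e
  let half := 2 ^ e / 2
  if half < r ∨ (r = half ∧ q % 2 = 1) then q + 1 else q
-- float(n): n rounded to 53 significant bits, nearest-even (exact integer value for n < 2^62)
def pvToFloat (n : Nat) : Nat :=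
  let B := pvBitLen n
  if B ≤ 53 then n
  else (pvRoundHalfEven n (B - 53)) * 2 ^ (B - 53)
def pvRound2N (a : Nat) : Nat :=
  let n := a * a
  if n = 0 then 0
  else
    let p := pvToFloat n                         -- float(a*a)
    -- sqrt(p/2) correctly rounded to binary64: mantissa m over 2^e, no ties can occur
    let L := pvBitLen p
    let t0 := 105 - L
    let t := if t0 % 2 = 0 then t0 + 1 else t0   -- t odd, p * 2^t ∈ [2^104, 2^106)
    let m := (pvSqrt (4 * (p * 2 ^ t)) + 1) / 2  -- nearest integer to sqrt(p * 2^t)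
    pvRoundHalfEven m ((t + 1) / 2)              -- round(m / 2^((t+1)/2)), ties to even
def pvRound2 (r : Int) : Int := ((pvRound2N r.natAbs : Nat) : Int)

-- total form of Python's M[a][b]: Pre_ keeps every access A realises in range (or guarded), so exact there
def pvIdxA (M : List (List Int)) (a b : Int) : Int :=
  PySem.List.pyGetD (PySem.List.pyGetD M a []) b 0

def buildFeatureArray (red_v : List (List Int)) (green_v : List (List Int)) (blue_v : List (List Int)) (radius : Int) (radius1 : Int) (radius2 : Int) : List (List Int) :=
  let n : Int := PySem.List.len red_v
  let m : Int := PySem.List.len (PySem.List.pyGetD red_v 0 [])  -- red_v[0]: Pre_ has red_v ≠ []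
  let val : Int := pvRound2 radius
  let val1 : Int := pvRound2 radius1
  (PySem.List.pyRange 0 n 1).foldl (fun inputs i =>
    (PySem.List.pyRange 0 m 1).foldl (fun inputs j =>
      inputs ++
        [[pvIdxA red_v i j,
          pvIdxA green_v i j,
          pvIdxA blue_v i j,
          (if j - radius ≥ 0 then pvIdxA red_v i (j - radius) else 0),
          (if j - radius ≥ 0 then pvIdxA green_v i (j - radius) else 0),
          (if j - radius ≥ 0 then pvIdxA blue_v i (j - radius) else 0),
          (if j + radius < m then pvIdxA red_v i (j + radius) else 0),
          (if j + radius < m then pvIdxA green_v i (j + radius) else 0),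
          (if j + radius < m then pvIdxA blue_v i (j + radius) else 0),
          (if i - radius ≥ 0 then pvIdxA red_v (i - radius) j else 0),
          (if i - radius ≥ 0 then pvIdxA green_v (i - radius) j else 0),
          (if i - radius ≥ 0 then pvIdxA blue_v (i - radius) j else 0),
          (if i + radius < n then pvIdxA red_v (i + radius) j else 0),
          (if i + radius < n then pvIdxA green_v (i + radius) j else 0),
          (if i + radius < n then pvIdxA blue_v (i + radius) j else 0),
          (if i + val < n ∧ j + val < m then pvIdxA red_v (i + val) (j + val) else 0),
          (if i + val < n ∧ j + val < m then pvIdxA green_v (i + val) (j + val) else 0),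
          (if i + val < n ∧ j + val < m then pvIdxA blue_v (i + val) (j + val) else 0),
          (if i - val ≥ 0 ∧ j + val < m then pvIdxA red_v (i - val) (j + val) else 0),
          (if i - val ≥ 0 ∧ j + val < m then pvIdxA green_v (i - val) (j + val) else 0),
          (if i - val ≥ 0 ∧ j + val < m then pvIdxA blue_v (i - val) (j + val) else 0),
          (if i + val < n ∧ j - val ≥ 0 then pvIdxA red_v (i + val) (j - val) else 0),
          (if i + val < n ∧ j - val ≥ 0 then pvIdxA green_v (i + val) (j - val) else 0),
          (if i + val < n ∧ j - val ≥ 0 then pvIdxA blue_v (i + val) (j - val) else 0),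
          (if i - val ≥ 0 ∧ j - val ≥ 0 then pvIdxA red_v (i - val) (j - val) else 0),
          (if i - val ≥ 0 ∧ j - val ≥ 0 then pvIdxA green_v (i - val) (j - val) else 0),
          (if i - val ≥ 0 ∧ j - val ≥ 0 then pvIdxA blue_v (i - val) (j - val) else 0),
          (if j - radius1 ≥ 0 then pvIdxA red_v i (j - radius1) else 0),
          (if j - radius1 ≥ 0 then pvIdxA green_v i (j - radius1) else 0),
          (if j - radius1 ≥ 0 then pvIdxA blue_v i (j - radius1) else 0),
          (if j + radius1 < m then pvIdxA red_v i (j + radius1) else 0),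
          (if j + radius1 < m then pvIdxA green_v i (j + radius1) else 0),
          (if j + radius1 < m then pvIdxA blue_v i (j + radius1) else 0),
          (if i - radius1 ≥ 0 then pvIdxA red_v (i - radius1) j else 0),
          (if i - radius1 ≥ 0 then pvIdxA green_v (i - radius1) j else 0),
          (if i - radius1 ≥ 0 then pvIdxA blue_v (i - radius1) j else 0),
          (if i + radius1 < n then pvIdxA red_v (i + radius1) j else 0),
          (if i + radius1 < n then pvIdxA green_v (i + radius1) j else 0),
          (if i + radius1 < n then pvIdxA blue_v (i + radius1) j else 0),
          (if i + val1 < n ∧ j + val1 < m then pvIdxA red_v (i + val1) (j + val1) else 0),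
          (if i + val1 < n ∧ j + val1 < m then pvIdxA green_v (i + val1) (j + val1) else 0),
          (if i + val1 < n ∧ j + val1 < m then pvIdxA blue_v (i + val1) (j + val1) else 0),
          (if i - val1 ≥ 0 ∧ j + val1 < m then pvIdxA red_v (i - val1) (j + val1) else 0),
          (if i - val1 ≥ 0 ∧ j + val1 < m then pvIdxA green_v (i - val1) (j + val1) else 0),
          (if i - val1 ≥ 0 ∧ j + val1 < m then pvIdxA blue_v (i - val1) (j + val1) else 0),
          (if i + val1 < n ∧ j - val1 ≥ 0 then pvIdxA red_v (i + val1) (j - val1) else 0),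
          (if i + val1 < n ∧ j - val1 ≥ 0 then pvIdxA green_v (i + val1) (j - val1) else 0),
          (if i + val1 < n ∧ j - val1 ≥ 0 then pvIdxA blue_v (i + val1) (j - val1) else 0),
          (if i - val1 ≥ 0 ∧ j - val1 ≥ 0 then pvIdxA red_v (i - val1) (j - val1) else 0),
          (if i - val1 ≥ 0 ∧ j - val1 ≥ 0 then pvIdxA green_v (i - val1) (j - val1) else 0),
          (if i - val1 ≥ 0 ∧ j - val1 ≥ 0 then pvIdxA blue_v (i - val1) (j - val1) else 0),
          (if j - radius2 ≥ 0 then pvIdxA red_v i (j - radius2) else 0),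
          (if j - radius2 ≥ 0 then pvIdxA green_v i (j - radius2) else 0),
          (if j - radius2 ≥ 0 then pvIdxA blue_v i (j - radius2) else 0),
          (if j + radius2 < m then pvIdxA red_v i (j + radius2) else 0),
          (if j + radius2 < m then pvIdxA green_v i (j + radius2) else 0),
          (if j + radius2 < m then pvIdxA blue_v i (j + radius2) else 0),
          (if i - radius2 ≥ 0 then pvIdxA red_v (i - radius2) j else 0),
          (if i - radius2 ≥ 0 then pvIdxA green_v (i - radius2) j else 0),
          (if i - radius2 ≥ 0 then pvIdxA blue_v (i - radius2) j else 0),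
          (if i + radius2 < n then pvIdxA red_v (i + radius2) j else 0),
          (if i + radius2 < n then pvIdxA green_v (i + radius2) j else 0),
          (if i + radius2 < n then pvIdxA blue_v (i + radius2) j else 0)]]) inputs) []

-- ===== PORT B =====
-- Source B's inner helper `plane(ch, di, dj)`: the in-range rows, sliced and padded with zero rows
-- (this is the row-selection step of `plane`)
def pvRows (ch : List (List Int)) (zero : List Int) (di n : Int) : List (List Int) :=
  if di ≥ 0 then
    let p := PySem.List.slice ch (some di) (some n)
    p ++ PySem.List.pyRepeat [zero] (n - PySem.List.len p)
  else
    let p := PySem.List.slice ch none (some (max 0 (n + di)))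
    PySem.List.pyRepeat [zero] (n - PySem.List.len p) ++ p

-- the per-row column-shift step of `plane`: slice the in-range columns out of `row`, zero-pad
def pvShiftRow (row : List Int) (dj m : Int) : List Int :=
  if dj ≥ 0 then
    let t := PySem.List.slice row (some dj) (some m)
    t ++ PySem.List.pyRepeat [(0 : Int)] (m - PySem.List.len t)
  else
    let t := PySem.List.slice row none (some (max 0 (m + dj)))
    PySem.List.pyRepeat [(0 : Int)] (m - PySem.List.len t) ++ t

def pvPlane (ch : List (List Int)) (di dj n m : Int) : List Int :=
  let zero := PySem.List.pyRepeat [(0 : Int)] m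
  (pvRows ch zero di n).foldl (fun flat row => flat ++ pvShiftRow row dj m) []

def buildFeatureArray_alt (red_v : List (List Int)) (green_v : List (List Int)) (blue_v : List (List Int)) (radius : Int) (radius1 : Int) (radius2 : Int) : List (List Int) :=
  let n : Int := PySem.List.len red_v
  let m : Int := PySem.List.len (PySem.List.pyGetD red_v 0 [])
  let val : Int := pvRound2 radius
  let val1 : Int := pvRound2 radius1
  let offsets : List (Int × Int) :=
    [(0, 0),
     (0, -radius), (0, radius), (-radius, 0), (radius, 0),
     (val, val), (-val, val), (val, -val), (-val, -val),
     (0, -radius1), (0, radius1), (-radius1, 0), (radius1, 0),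
     (val1, val1), (-val1, val1), (val1, -val1), (-val1, -val1),
     (0, -radius2), (0, radius2), (-radius2, 0), (radius2, 0)]
  let planes : List (List Int) :=
    offsets.flatMap (fun d => [red_v, green_v, blue_v].map (fun ch => pvPlane ch d.1 d.2 n m))
  (PySem.List.pyRange 0 (n * m) 1).map (fun k => planes.map (fun p => PySem.List.pyGetD p k 0))

-- ===== PRECONDITION & SPEC =====
-- Pre_ is exactly the set of inputs on which the Python A returns normally: red_v nonempty
-- (else red_v[0] raises), and, unless row 0 is empty (m = 0: nothing is indexed), all three
-- radii nonnegative (a negative radius always sends the index j-radius past the row end at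
-- j = m-1, an IndexError) and every accessed row long enough (else IndexError).
def Pre_buildFeatureArray (red_v : List (List Int)) (green_v : List (List Int)) (blue_v : List (List Int)) (radius : Int) (radius1 : Int) (radius2 : Int) : Prop :=
  red_v ≠ [] ∧
  ((PySem.List.pyGetD red_v 0 ([] : List Int)).length = 0 ∨
   (0 ≤ radius ∧ 0 ≤ radius1 ∧ 0 ≤ radius2 ∧
    red_v.length ≤ green_v.length ∧ red_v.length ≤ blue_v.length ∧
    (∀ row ∈ red_v, (PySem.List.pyGetD red_v 0 ([] : List Int)).length ≤ row.length) ∧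
    (∀ row ∈ green_v.take red_v.length, (PySem.List.pyGetD red_v 0 ([] : List Int)).length ≤ row.length) ∧
    (∀ row ∈ blue_v.take red_v.length, (PySem.List.pyGetD red_v 0 ([] : List Int)).length ≤ row.length)))
instance (red_v : List (List Int)) (green_v : List (List Int)) (blue_v : List (List Int)) (radius : Int) (radius1 : Int) (radius2 : Int) : Decidable (Pre_buildFeatureArray red_v green_v blue_v radius radius1 radius2) := by unfold Pre_buildFeatureArray; infer_instance

def pvWitness_buildFeatureArray : List (List Int) × List (List Int) × List (List Int) × Int × Int × Int :=
  ([[1, 2], [3, 4]], [[5, 6], [7, 8]], [[9, 10], [11, 12]], 1, 2, 3)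

def Spec_buildFeatureArray (red_v : List (List Int)) (green_v : List (List Int)) (blue_v : List (List Int)) (radius : Int) (radius1 : Int) (radius2 : Int) (out : List (List Int)) : Prop := out = buildFeatureArray_alt red_v green_v blue_v radius radius1 radius2
instance (red_v : List (List Int)) (green_v : List (List Int)) (blue_v : List (List Int)) (radius : Int) (radius1 : Int) (radius2 : Int) (out : List (List Int)) : Decidable (Spec_buildFeatureArray red_v green_v blue_v radius radius1 radius2 out) := by unfold Spec_buildFeatureArray; infer_instance

-- ===== CLAIM (what is proved, stated in full; the proofs are below) =====
def Claim_equal_buildFeatureArray : Prop := ∀ (red_v : List (List Int)) (green_v : List (List Int)) (blue_v : List (List Int)) (radius : Int) (radius1 : Int) (radius2 : Int), Dom_buildFeatureArray red_v green_v blue_v radius radius1 radius2 → Pre_buildFeatureArray red_v green_v blue_v radius radius1 radius2 → Spec_buildFeatureArray red_v green_v blue_v radius radius1 radius2 (buildFeatureArray red_v green_v blue_v radius radius1 radius2)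

-- ===== LEMMAS AND PROOFS =====
theorem pvRound2_nonneg (r : Int) : 0 ≤ pvRound2 r := by
  unfold pvRound2; exact Int.natCast_nonneg _

theorem pvShiftRow_length (row : List Int) (dj m : Int) (hm : 0 ≤ m) :
    (pvShiftRow row dj m).length = m.toNat := by
  simp only [pvShiftRow]
  split_ifs with h
  · rw [PySem.List.slice_toNat row h hm]
    simp only [PySem.List.pyRepeat_singleton, PySem.List.len_eq, List.length_append,
      List.length_replicate, List.length_take, List.length_drop]
    omega
  · rw [PySem.List.slice_to row (le_max_left 0 (m + dj))]
    simp only [PySem.List.pyRepeat_singleton, PySem.List.len_eq, List.length_append,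
      List.length_replicate, List.length_take]
    omega

theorem pvShiftRow_get (row : List Int) (dj m j : Int)
    (hm : m ≤ (row.length : Int)) (hj0 : 0 ≤ j) (hjm : j < m) :
    PySem.List.pyGetD (pvShiftRow row dj m) j 0 =
      if 0 ≤ j + dj ∧ j + dj < m then PySem.List.pyGetD row (j + dj) 0 else 0 := by
  have hm0 : (0 : Int) ≤ m := le_trans hj0 (le_of_lt hjm)
  have hjn : j = ((j.toNat : Nat) : Int) := by omega
  simp only [pvShiftRow]
  split_ifs with h hg hg
  · -- dj ≥ 0, in-bounds column
    conv_lhs => rw [hjn, PySem.List.pyGetD_natCast, List.getD_eq_getElem?_getD]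
    rw [PySem.List.slice_toNat row h hm0, PySem.List.pyRepeat_singleton]
    rw [List.getElem?_append_left
        (by simp only [List.length_take, List.length_drop]; omega),
      List.getElem?_take_of_lt (by omega), List.getElem?_drop]
    conv_rhs => rw [show j + dj = (((j + dj).toNat : Nat) : Int) by omega]
    rw [PySem.List.pyGetD_natCast, List.getD_eq_getElem?_getD,
      show dj.toNat + j.toNat = (j + dj).toNat by omega]
  · -- dj ≥ 0, column out of range on the right
    conv_lhs => rw [hjn, PySem.List.pyGetD_natCast, List.getD_eq_getElem?_getD]
    rw [PySem.List.slice_toNat row h hm0, PySem.List.pyRepeat_singleton]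
    rw [List.getElem?_append_right
        (by simp only [List.length_take, List.length_drop]; omega),
      List.getElem?_replicate,
      if_pos (by simp only [List.length_take, List.length_drop, PySem.List.len_eq]; omega)]
    rfl
  · -- dj < 0, in-bounds column
    conv_lhs => rw [hjn, PySem.List.pyGetD_natCast, List.getD_eq_getElem?_getD]
    rw [PySem.List.slice_to row (le_max_left 0 (m + dj)), PySem.List.pyRepeat_singleton]
    rw [List.getElem?_append_right
        (by simp only [List.length_replicate, PySem.List.len_eq, List.length_take]; omega)]
    simp only [List.length_replicate, PySem.List.len_eq, List.length_take]
    rw [List.getElem?_take_of_lt (by omega)]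
    conv_rhs => rw [show j + dj = (((j + dj).toNat : Nat) : Int) by omega]
    rw [PySem.List.pyGetD_natCast, List.getD_eq_getElem?_getD,
      show j.toNat - (m - ((min (max 0 (m + dj)).toNat row.length : Nat) : Int)).toNat = (j + dj).toNat by omega]
  · -- dj < 0, column out of range on the left
    conv_lhs => rw [hjn, PySem.List.pyGetD_natCast, List.getD_eq_getElem?_getD]
    rw [PySem.List.slice_to row (le_max_left 0 (m + dj)), PySem.List.pyRepeat_singleton]
    rw [List.getElem?_append_left
        (by simp only [List.length_replicate, PySem.List.len_eq, List.length_take]; omega),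
      List.getElem?_replicate,
      if_pos (by simp only [PySem.List.len_eq, List.length_take]; omega)]
    rfl

theorem pvRows_length (ch : List (List Int)) (zero : List Int) (di n : Int)
    (hch : n ≤ (ch.length : Int)) (hn0 : 0 ≤ n) :
    (pvRows ch zero di n).length = n.toNat := by
  simp only [pvRows]
  split_ifs with h
  · rw [PySem.List.slice_toNat ch h hn0]
    simp only [PySem.List.pyRepeat_singleton, PySem.List.len_eq, List.length_append,
      List.length_replicate, List.length_take, List.length_drop]
    omega
  · rw [PySem.List.slice_to ch (le_max_left 0 (n + di))]
    simp only [PySem.List.pyRepeat_singleton, PySem.List.len_eq, List.length_append,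
      List.length_replicate, List.length_take]
    omega

theorem pvRows_getD (ch : List (List Int)) (zero : List Int) (di n i : Int)
    (hch : n ≤ (ch.length : Int)) (hi0 : 0 ≤ i) (hin : i < n) :
    (pvRows ch zero di n).getD i.toNat [] =
      if 0 ≤ i + di ∧ i + di < n then ch.getD (i + di).toNat [] else zero := by
  have hn0 : (0 : Int) ≤ n := le_trans hi0 (le_of_lt hin)
  rw [List.getD_eq_getElem?_getD]
  simp only [pvRows]
  split_ifs with h hg hg
  · -- di ≥ 0, in-bounds row
    rw [PySem.List.slice_toNat ch h hn0]
    rw [List.getElem?_append_left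
        (by simp only [List.length_take, List.length_drop]; omega),
      List.getElem?_take_of_lt (by omega), List.getElem?_drop,
      show di.toNat + i.toNat = (i + di).toNat by omega,
      List.getD_eq_getElem?_getD]
  · -- di ≥ 0, row out of range below
    rw [PySem.List.slice_toNat ch h hn0, PySem.List.pyRepeat_singleton]
    rw [List.getElem?_append_right
        (by simp only [List.length_take, List.length_drop]; omega),
      List.getElem?_replicate,
      if_pos (by simp only [PySem.List.len_eq, List.length_take, List.length_drop]; omega)]
    rfl
  · -- di < 0, in-bounds row
    rw [PySem.List.slice_to ch (le_max_left 0 (n + di)), PySem.List.pyRepeat_singleton]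
    rw [List.getElem?_append_right
        (by simp only [List.length_replicate, PySem.List.len_eq, List.length_take]; omega)]
    simp only [List.length_replicate, PySem.List.len_eq, List.length_take]
    rw [List.getElem?_take_of_lt (by omega),
      show i.toNat - (n - ((min (max 0 (n + di)).toNat ch.length : Nat) : Int)).toNat = (i + di).toNat by omega,
      List.getD_eq_getElem?_getD]
  · -- di < 0, row out of range above
    rw [PySem.List.slice_to ch (le_max_left 0 (n + di)), PySem.List.pyRepeat_singleton]
    rw [List.getElem?_append_left
        (by simp only [List.length_replicate, PySem.List.len_eq, List.length_take]; omega),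
      List.getElem?_replicate,
      if_pos (by simp only [PySem.List.len_eq, List.length_take]; omega)]
    rfl

-- indexing into a concatenation of constant-length blocks picks block i, position j
theorem pvFlatIndex (f : List Int → List Int) (M : Nat) (rs : List (List Int))
    (hf : ∀ r ∈ rs, (f r).length = M) (i j : Nat) (hi : i < rs.length) (hj : j < M) :
    (rs.flatMap f)[i * M + j]? = (f (rs.getD i []))[j]? := by
  induction rs generalizing i with
  | nil => simp at hi
  | cons r rs ih =>
    rw [List.flatMap_cons]
    cases i with
    | zero =>
      rw [Nat.zero_mul, Nat.zero_add,
        List.getElem?_append_left (by rw [hf r (by simp)]; exact hj), List.getD_cons_zero]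
    | succ i' =>
      rw [List.getElem?_append_right (by rw [hf r (by simp), Nat.succ_mul]; omega)]
      rw [hf r (by simp), show (i' + 1) * M + j - M = i' * M + j by rw [Nat.succ_mul]; omega,
        List.getD_cons_succ]
      exact ih (fun x hx => hf x (by simp [hx])) i' (by simpa using hi)

theorem pvPlane_get (ch : List (List Int)) (di dj n m i j : Int)
    (hch : n ≤ (ch.length : Int))
    (hrow : ∀ k : Nat, (k : Int) < n → m ≤ ((ch.getD k []).length : Int))
    (hi0 : 0 ≤ i) (hin : i < n) (hj0 : 0 ≤ j) (hjm : j < m) :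
    PySem.List.pyGetD (pvPlane ch di dj n m) (i * m + j) 0 =
      if 0 ≤ i + di ∧ i + di < n ∧ 0 ≤ j + dj ∧ j + dj < m
      then PySem.List.pyGetD (PySem.List.pyGetD ch (i + di) []) (j + dj) 0 else 0 := by
  have hn0 : (0 : Int) ≤ n := le_trans hi0 (le_of_lt hin)
  have hm0 : (0 : Int) ≤ m := le_trans hj0 (le_of_lt hjm)
  simp only [pvPlane]
  rw [PySem.List.foldl_append_eq_flatMap, List.nil_append]
  conv_lhs =>
    rw [show i * m + j = (((i.toNat * m.toNat + j.toNat : Nat) : Nat) : Int) by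
        push_cast
        rw [Int.toNat_of_nonneg hi0, Int.toNat_of_nonneg hj0, Int.toNat_of_nonneg hm0],
      PySem.List.pyGetD_natCast, List.getD_eq_getElem?_getD]
  rw [pvFlatIndex (fun row => pvShiftRow row dj m) m.toNat _
      (fun r _ => pvShiftRow_length r dj m hm0) i.toNat j.toNat
      (by rw [pvRows_length ch _ di n hch hn0]; omega) (by omega)]
  rw [← List.getD_eq_getElem?_getD, ← PySem.List.pyGetD_natCast,
    show ((j.toNat : Nat) : Int) = j by omega]
  rw [pvRows_getD ch _ di n i hch hi0 hin]
  by_cases hrg : 0 ≤ i + di ∧ i + di < n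
  · rw [if_pos hrg,
      pvShiftRow_get _ dj m j (hrow (i + di).toNat (by omega)) hj0 hjm]
    have hee : PySem.List.pyGetD ch (i + di) [] = ch.getD (i + di).toNat [] := by
      conv_lhs => rw [show i + di = (((i + di).toNat : Nat) : Int) by omega,
        PySem.List.pyGetD_natCast]
    rw [hee]
    by_cases hcg : 0 ≤ j + dj ∧ j + dj < m
    · rw [if_pos hcg, if_pos ⟨hrg.1, hrg.2, hcg.1, hcg.2⟩]
    · rw [if_neg hcg,
        if_neg (show ¬(0 ≤ i + di ∧ i + di < n ∧ 0 ≤ j + dj ∧ j + dj < m) from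
          fun hc => hcg ⟨hc.2.2.1, hc.2.2.2⟩)]
  · rw [if_neg hrg,
      pvShiftRow_get _ dj m j (by simp only [PySem.List.pyRepeat_singleton, List.length_replicate]; omega) hj0 hjm,
      if_neg (show ¬(0 ≤ i + di ∧ i + di < n ∧ 0 ≤ j + dj ∧ j + dj < m) from
        fun hc => hrg ⟨hc.1, hc.2.1⟩)]
    split_ifs with hcg
    · rw [PySem.List.pyRepeat_singleton,
        show j + dj = (((j + dj).toNat : Nat) : Int) by omega, PySem.List.pyGetD_natCast,
        List.getD_eq_getElem?_getD, List.getElem?_replicate]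
      split_ifs <;> rfl
    · rfl

theorem pvRangeMul (N M : Nat) :
    PySem.List.pyRange 0 ((N : Int) * (M : Int)) 1 =
      (PySem.List.pyRange 0 (N : Int) 1).flatMap
        (fun i => (PySem.List.pyRange 0 (M : Int) 1).map (fun j => i * (M : Int) + j)) := by
  induction N with
  | zero => simp [PySem.List.pyRange_one_eq_nil]
  | succ K ih =>
    have hc : ((K + 1 : Nat) : Int) = (K : Int) + 1 := by push_cast; ring
    rw [hc, PySem.List.pyRange_one_succ_right (by positivity), List.flatMap_append, ← ih]
    have hsplit : PySem.List.pyRange 0 (((K : Int) + 1) * (M : Int)) 1 =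
        PySem.List.pyRange 0 ((K : Int) * (M : Int)) 1 ++
        PySem.List.pyRange ((K : Int) * (M : Int)) (((K : Int) + 1) * (M : Int)) 1 :=
      PySem.List.pyRange_one_append 0 _ _ (by positivity) (by nlinarith)
    rw [hsplit]
    congr 1
    rw [List.flatMap_cons, List.flatMap_nil, List.append_nil]
    rw [PySem.List.pyRange_one ((K : Int) * (M : Int)) (((K : Int) + 1) * (M : Int)),
      PySem.List.pyRange_one 0 (M : Int), List.map_map]
    have hdiff : (((K : Int) + 1) * (M : Int) - (K : Int) * (M : Int)).toNat = M := by
      have : ((K : Int) + 1) * (M : Int) - (K : Int) * (M : Int) = (M : Int) := by ring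
      rw [this]; exact Int.toNat_natCast M
    rw [hdiff, show ((M : Int) - 0).toNat = M by omega]
    apply List.map_congr_left
    intro k _
    simp only [Function.comp]
    ring

theorem pvWitness_ok : Dom_buildFeatureArray (pvWitness_buildFeatureArray.1) (pvWitness_buildFeatureArray.2.1) (pvWitness_buildFeatureArray.2.2.1) (pvWitness_buildFeatureArray.2.2.2.1) (pvWitness_buildFeatureArray.2.2.2.2.1) (pvWitness_buildFeatureArray.2.2.2.2.2) ∧ Pre_buildFeatureArray (pvWitness_buildFeatureArray.1) (pvWitness_buildFeatureArray.2.1) (pvWitness_buildFeatureArray.2.2.1) (pvWitness_buildFeatureArray.2.2.2.1) (pvWitness_buildFeatureArray.2.2.2.2.1) (pvWitness_buildFeatureArray.2.2.2.2.2) := by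
  decide

-- ===== VERDICT (by name: the statement is the Claim_ definition above) =====
theorem buildFeatureArray_spec : Claim_equal_buildFeatureArray := by
  unfold Claim_equal_buildFeatureArray
  intro red_v green_v blue_v radius radius1 radius2 hdom hpre
  unfold Spec_buildFeatureArray
  obtain ⟨hne, hcase⟩ := hpre
  simp only [buildFeatureArray, buildFeatureArray_alt, PySem.List.len_eq]
  simp only [PySem.List.foldl_append_singleton_eq_map, PySem.List.foldl_append_eq_flatMap,
    List.nil_append]
  rcases hcase with hm0 | ⟨hr, hr1, hr2, hg, hb, hrR, hrG, hrB⟩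
  · -- m = 0: both sides are the empty list
    simp only [hm0, Nat.cast_zero, mul_zero]
    simp [PySem.List.pyRange_one_eq_nil, List.flatMap]
  · have hv : (0 : Int) ≤ pvRound2 radius := pvRound2_nonneg radius
    have hv1 : (0 : Int) ≤ pvRound2 radius1 := pvRound2_nonneg radius1
    rw [pvRangeMul red_v.length (PySem.List.pyGetD red_v 0 ([] : List Int)).length,
      List.map_flatMap]
    simp only [List.map_map]
    apply List.flatMap_congr
    intro i hi
    apply List.map_congr_left
    intro j hj
    rw [PySem.List.mem_pyRange_one] at hi hj
    obtain ⟨hi0, hin⟩ := hi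
    obtain ⟨hj0, hjm⟩ := hj
    have hrowR : ∀ k : Nat, (k : Int) < (red_v.length : Int) → ((PySem.List.pyGetD red_v 0 ([] : List Int)).length : Int) ≤ ((red_v.getD k []).length : Int) := by
      intro k hk
      have hkl : k < red_v.length := by omega
      rw [List.getD_eq_getElem?_getD, List.getElem?_eq_getElem hkl]
      simp only [Option.getD_some]
      exact_mod_cast hrR (red_v[k]) (List.getElem_mem hkl)
    have hrowG : ∀ k : Nat, (k : Int) < (red_v.length : Int) → ((PySem.List.pyGetD red_v 0 ([] : List Int)).length : Int) ≤ ((green_v.getD k []).length : Int) := by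
      intro k hk
      have hkl : k < green_v.length := by omega
      have hk2 : k < (green_v.take red_v.length).length := by
        simp only [List.length_take]; omega
      have hmem : green_v[k] ∈ green_v.take red_v.length := by
        have he : (green_v.take red_v.length)[k] = green_v[k] := List.getElem_take
        rw [← he]; exact List.getElem_mem hk2
      rw [List.getD_eq_getElem?_getD, List.getElem?_eq_getElem hkl]
      simp only [Option.getD_some]
      exact_mod_cast hrG (green_v[k]) hmem
    have hrowB : ∀ k : Nat, (k : Int) < (red_v.length : Int) → ((PySem.List.pyGetD red_v 0 ([] : List Int)).length : Int) ≤ ((blue_v.getD k []).length : Int) := by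
      intro k hk
      have hkl : k < blue_v.length := by omega
      have hk2 : k < (blue_v.take red_v.length).length := by
        simp only [List.length_take]; omega
      have hmem : blue_v[k] ∈ blue_v.take red_v.length := by
        have he : (blue_v.take red_v.length)[k] = blue_v[k] := List.getElem_take
        rw [← he]; exact List.getElem_mem hk2
      rw [List.getD_eq_getElem?_getD, List.getElem?_eq_getElem hkl]
      simp only [Option.getD_some]
      exact_mod_cast hrB (blue_v[k]) hmem
    have hPr : ∀ di dj : Int, PySem.List.pyGetD (pvPlane red_v di dj (red_v.length : Int) ((PySem.List.pyGetD red_v 0 ([] : List Int)).length : Int)) (i * ((PySem.List.pyGetD red_v 0 ([] : List Int)).length : Int) + j) 0 =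
        if 0 ≤ i + di ∧ i + di < (red_v.length : Int) ∧ 0 ≤ j + dj ∧ j + dj < ((PySem.List.pyGetD red_v 0 ([] : List Int)).length : Int)
        then PySem.List.pyGetD (PySem.List.pyGetD red_v (i + di) []) (j + dj) 0 else 0 :=
      fun di dj => pvPlane_get red_v di dj _ _ i j (le_refl _) hrowR hi0 hin hj0 hjm
    have hPg : ∀ di dj : Int, PySem.List.pyGetD (pvPlane green_v di dj (red_v.length : Int) ((PySem.List.pyGetD red_v 0 ([] : List Int)).length : Int)) (i * ((PySem.List.pyGetD red_v 0 ([] : List Int)).length : Int) + j) 0 =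
        if 0 ≤ i + di ∧ i + di < (red_v.length : Int) ∧ 0 ≤ j + dj ∧ j + dj < ((PySem.List.pyGetD red_v 0 ([] : List Int)).length : Int)
        then PySem.List.pyGetD (PySem.List.pyGetD green_v (i + di) []) (j + dj) 0 else 0 :=
      fun di dj => pvPlane_get green_v di dj _ _ i j (by exact_mod_cast hg) hrowG hi0 hin hj0 hjm
    have hPb : ∀ di dj : Int, PySem.List.pyGetD (pvPlane blue_v di dj (red_v.length : Int) ((PySem.List.pyGetD red_v 0 ([] : List Int)).length : Int)) (i * ((PySem.List.pyGetD red_v 0 ([] : List Int)).length : Int) + j) 0 =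
        if 0 ≤ i + di ∧ i + di < (red_v.length : Int) ∧ 0 ≤ j + dj ∧ j + dj < ((PySem.List.pyGetD red_v 0 ([] : List Int)).length : Int)
        then PySem.List.pyGetD (PySem.List.pyGetD blue_v (i + di) []) (j + dj) 0 else 0 :=
      fun di dj => pvPlane_get blue_v di dj _ _ i j (by exact_mod_cast hb) hrowB hi0 hin hj0 hjm
    simp only [Function.comp_apply, List.flatMap_cons, List.flatMap_nil, List.map_cons,
      List.map_nil, List.append_nil, List.cons_append, List.nil_append]
    simp only [hPr, hPg, hPb, pvIdxA, add_zero, ← sub_eq_add_neg]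
    simp only [List.cons.injEq, and_true]
    refine ⟨?_, ?_, ?_, ?_, ?_, ?_, ?_, ?_, ?_, ?_, ?_, ?_, ?_, ?_, ?_, ?_, ?_, ?_, ?_, ?_, ?_, ?_, ?_, ?_, ?_, ?_, ?_, ?_, ?_, ?_, ?_, ?_, ?_, ?_, ?_, ?_, ?_, ?_, ?_, ?_, ?_, ?_, ?_, ?_, ?_, ?_, ?_, ?_, ?_, ?_, ?_, ?_, ?_, ?_, ?_, ?_, ?_, ?_, ?_, ?_, ?_, ?_, ?_⟩ <;>
      (split_ifs <;> first | rfl | (exfalso; omega))
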